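-- pv_equiv track=rewrite | github.com/MrMagicPickle/competitive-programming | leetcode/weekly-216/q1.py | solve
-- ===== SOURCE A (Python) =====
-- def solve(word1, word2):
--   s1 = ''
--   s2 = ''
--   for x in word1:
--     s1 += x
--   for x in word2:
--     s2 += x
--   return s1 == s2
-- ===== SOURCE B (Python) =====
-- from itertools import chain, zip_longest
--
-- def solve(word1, word2):
--     sentinel = object()
--     for a, b in zip_longest(chain.from_iterable(word1),
--                             chain.from_iterable(word2),
--                             fillvalue=sentinel):
--         if a is not b and a != b:
--             return False
--     return True
-- ===== Notes on version B (the rewrite author's own statement) =====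
-- stated objective: idiomatic
-- what changed: B never builds the concatenated strings: it flattens both lists into lazy character streams and compares them in lockstep with zip_longest and a sentinel, short-circuiting at the first mismatch.
import Mathlib
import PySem

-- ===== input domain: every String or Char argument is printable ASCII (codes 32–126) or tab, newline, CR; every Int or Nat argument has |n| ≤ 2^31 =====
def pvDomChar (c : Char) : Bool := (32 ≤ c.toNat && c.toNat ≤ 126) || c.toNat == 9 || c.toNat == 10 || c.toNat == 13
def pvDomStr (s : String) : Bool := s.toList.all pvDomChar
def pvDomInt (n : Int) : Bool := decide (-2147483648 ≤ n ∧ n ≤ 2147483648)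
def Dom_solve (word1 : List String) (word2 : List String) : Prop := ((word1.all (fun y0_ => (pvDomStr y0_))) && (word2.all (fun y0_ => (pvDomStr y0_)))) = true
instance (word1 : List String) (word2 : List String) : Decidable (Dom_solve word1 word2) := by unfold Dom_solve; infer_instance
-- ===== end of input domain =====

-- B compares the two flattened character streams in lockstep instead of building the
-- concatenated strings (objective: idiomatic; return value only, no side effects anywhere).

-- ===== PORT A =====
-- strings are handled on the List Char side (String.append/== are opaque to the kernel);
-- 's += x' is 's ++ x.toList', the final 's1 == s2' is List Char equality — exact.
def solve (word1 : List String) (word2 : List String) : Bool :=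
  let s1 : List Char := word1.foldl (fun a x => a ++ x.toList) []
  let s2 : List Char := word2.foldl (fun a x => a ++ x.toList) []
  s1 == s2

-- ===== PORT B =====
-- lockstep walk of the two character streams; a length difference (the sentinel case
-- of zip_longest) is the mismatched-shape patterns returning false.
def lockstep : List Char → List Char → Bool
  | [], [] => true
  | a :: as, b :: bs => if a != b then false else lockstep as bs
  | _, _ => false

def solve_alt (word1 : List String) (word2 : List String) : Bool :=
  lockstep (word1.flatMap String.toList) (word2.flatMap String.toList)

-- ===== PRECONDITION & SPEC =====
def Spec_solve (word1 : List String) (word2 : List String) (out : Bool) : Prop := out = solve_alt word1 word2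
instance (word1 : List String) (word2 : List String) (out : Bool) : Decidable (Spec_solve word1 word2 out) := by unfold Spec_solve; infer_instance

-- ===== CLAIM (what is proved, stated in full; the proofs are below) =====
def Claim_equal_solve : Prop := ∀ (word1 : List String) (word2 : List String), Dom_solve word1 word2 → Spec_solve word1 word2 (solve word1 word2)

-- ===== LEMMAS AND PROOFS =====
theorem foldl_append_toList (w : List String) (acc : List Char) :
    w.foldl (fun a x => a ++ x.toList) acc = acc ++ w.flatMap String.toList := by
  induction w generalizing acc with
  | nil => simp
  | cons x xs ih => simp [List.foldl, ih, List.append_assoc]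

theorem lockstep_eq_beq (xs ys : List Char) : lockstep xs ys = (xs == ys) := by
  induction xs generalizing ys with
  | nil => cases ys <;> simp [lockstep]
  | cons a as ih =>
    cases ys with
    | nil => simp [lockstep]
    | cons b bs =>
      by_cases h : a = b <;> simp [lockstep, h, ih]

-- ===== VERDICT (by name: the statement is the Claim_ definition above) =====
theorem solve_spec : Claim_equal_solve := by
  intro word1 word2 _
  unfold Spec_solve solve solve_alt
  rw [lockstep_eq_beq, foldl_append_toList, foldl_append_toList]
  simp
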